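-- pv_equiv track=rewrite | github.com/mathankrish/Python-Programs | Hacker-rank/infy9.py | print_factors
-- ===== SOURCE A (Python) =====
-- def print_factors(x):
--     l2 = []
--     l3 = []
--     for i in range(1, int(x) + 1):
--         if int(x) % int(i) == 0:
--             l2.append(i)
--
--     if len(l2) > 1:
--         for j in range(0, len(l2)):
--             if l2[j] + 1 in l2:
--                 if ((l2[j]+1) * l2[j] == int(x)):
--                     l3.append(x)
--     return l3
-- ===== SOURCE B (Python) =====
-- def print_factors(x):
--     # Faster: find the unique k>=1 with k*(k+1) >= x by direct search (O(sqrt x))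
--     # instead of enumerating all divisors of x (O(x)).
--     x = int(x)
--     if x < 2:
--         return []
--     k = 1
--     while k * (k + 1) < x:
--         k += 1
--     return [x] if k * (k + 1) == x else []
-- ===== Notes on version B (the rewrite author's own statement) =====
-- stated objective: faster
-- what changed: Replaces the full divisor enumeration (scan of 1..x plus a membership scan per divisor) by a direct search for the unique k>=1 with k*(k+1)>=x, then a single product test.
import Mathlib
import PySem

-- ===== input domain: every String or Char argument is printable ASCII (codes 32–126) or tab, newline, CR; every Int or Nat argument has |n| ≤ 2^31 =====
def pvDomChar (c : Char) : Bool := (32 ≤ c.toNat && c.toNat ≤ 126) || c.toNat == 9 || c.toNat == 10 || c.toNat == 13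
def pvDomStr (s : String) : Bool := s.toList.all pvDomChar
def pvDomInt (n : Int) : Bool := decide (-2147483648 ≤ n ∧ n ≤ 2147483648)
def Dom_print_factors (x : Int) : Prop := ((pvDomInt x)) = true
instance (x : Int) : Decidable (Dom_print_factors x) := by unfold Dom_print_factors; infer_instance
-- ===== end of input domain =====

-- B replaces A's divisor enumeration by a direct O(sqrt x) search for k with k*(k+1) >= x (objective: faster).


-- ===== PORT A =====
def print_factors (x : Int) : List Int :=
  -- l2 = divisor list; first loop 'for i in range(1, int(x)+1)'
  let l2 : List Int := (PySem.List.pyRange 1 (x + 1) 1).foldl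
    (fun acc i => if PySem.Int.mod x i == 0 then acc ++ [i] else acc) []
  -- second loop 'for j in range(0, len(l2))'
  if l2.length > 1 then
    (PySem.List.pyRange 0 (l2.length : Int) 1).foldl
      (fun acc j =>
        if l2.contains (PySem.List.pyGetD l2 j 0 + 1) then
          if (PySem.List.pyGetD l2 j 0 + 1) * PySem.List.pyGetD l2 j 0 == x then acc ++ [x]
          else acc
        else acc) []
  else []

-- ===== PORT B =====
-- 'while k * (k + 1) < x: k += 1'
def pvFindK (x k : Int) : Int :=
  if k * (k + 1) < x then pvFindK x (k + 1) else k
termination_by (x - k).toNat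
decreasing_by
  have h1 : 0 ≤ k * k := mul_self_nonneg k
  have h2 : k * (k + 1) = k * k + k := by ring
  omega

def print_factors_alt (x : Int) : List Int :=
  if x < 2 then []
  else
    let k := pvFindK x 1
    if k * (k + 1) == x then [x] else []

-- ===== PRECONDITION & SPEC =====
def Spec_print_factors (x : Int) (out : List Int) : Prop := out = print_factors_alt x
instance (x : Int) (out : List Int) : Decidable (Spec_print_factors x out) := by unfold Spec_print_factors; infer_instance

-- ===== CLAIM (what is proved, stated in full; the proofs are below) =====
def Claim_equal_print_factors : Prop := ∀ (x : Int), Dom_print_factors x → Spec_print_factors x (print_factors x)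

-- ===== LEMMAS AND PROOFS =====

-- the divisor list of A, in closed (filter) form
def pvL2 (x : Int) : List Int :=
  (PySem.List.pyRange 1 (x + 1) 1).filter (fun i => PySem.Int.mod x i == 0)

lemma pvL2_eq (x : Int) :
    (PySem.List.pyRange 1 (x + 1) 1).foldl
      (fun acc i => if PySem.Int.mod x i == 0 then acc ++ [i] else acc) [] = pvL2 x := by
  simpa [pvL2] using
    PySem.List.foldl_append_if_eq_filter (l := PySem.List.pyRange 1 (x + 1) 1)
      (p := fun i => PySem.Int.mod x i == 0) (acc := [])

lemma mem_pvL2 (x i : Int) : i ∈ pvL2 x ↔ (1 ≤ i ∧ i ≤ x) ∧ i ∣ x := by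
  rw [pvL2]
  simp only [List.mem_filter, PySem.List.mem_pyRange_one, beq_iff_eq,
    PySem.Int.mod_eq_zero_iff_dvd]
  constructor <;> (rintro ⟨⟨h1, h2⟩, h3⟩; exact ⟨⟨h1, by omega⟩, h3⟩)

lemma pvL2_nodup (x : Int) : (pvL2 x).Nodup :=
  (PySem.List.nodup_pyRange_one 1 (x + 1)).filter _

-- uniqueness of the solution of k*(k+1) = x among k ≥ 1
lemma pv_unique {a b : Int} (ha : 1 ≤ a) (hb : 1 ≤ b) (h : a * (a + 1) = b * (b + 1)) : a = b := by
  nlinarith [sq_nonneg (a - b), sq_nonneg (a + b)]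

lemma pv_filter_unique {l : List Int} {q : Int → Bool} {k : Int}
    (hnd : l.Nodup) (hk : k ∈ l) (hq : q k = true)
    (huniq : ∀ v ∈ l, q v = true → v = k) : l.filter q = [k] := by
  induction l with
  | nil => cases hk
  | cons a t ih =>
    rcases List.nodup_cons.mp hnd with ⟨hat, hndt⟩
    by_cases hak : a = k
    · subst hak
      have ht : t.filter q = [] := by
        apply List.filter_eq_nil_iff.mpr
        intro v hv hqv
        exact absurd ((huniq v (List.mem_cons_of_mem _ hv) hqv) ▸ hv) hat
      simp [hq, ht]
    · have hkt : k ∈ t := by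
        rcases List.mem_cons.mp hk with h | h
        · exact absurd h.symm hak
        · exact h
      have hqa : q a = false := by
        by_contra h
        exact hak (huniq a List.mem_cons_self (by simpa using h))
      rw [List.filter_cons_of_neg (by simp [hqa])]
      exact ih hndt hkt (fun v hv hqv => huniq v (List.mem_cons_of_mem _ hv) hqv)

-- properties of the B-side loop
lemma pvFindK_ge (x k : Int) : k ≤ pvFindK x k := by
  induction k using pvFindK.induct (x := x) with
  | case1 k h ih => rw [pvFindK]; simp [h]; omega
  | case2 k h => rw [pvFindK]; simp [h]

lemma pvFindK_stop (x k : Int) : x ≤ pvFindK x k * (pvFindK x k + 1) := by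
  induction k using pvFindK.induct (x := x) with
  | case1 k h ih => rw [pvFindK]; simpa [h] using ih
  | case2 k h => rw [pvFindK]; simp [h]; omega

lemma pvFindK_min (x k : Int) : ∀ m, k ≤ m → m < pvFindK x k → m * (m + 1) < x := by
  induction k using pvFindK.induct (x := x) with
  | case1 k h ih =>
    intro m hm hlt
    rw [pvFindK, if_pos h] at hlt
    rcases eq_or_lt_of_le hm with rfl | hm'
    · exact h
    · exact ih m (by omega) hlt
  | case2 k h =>
    intro m hm hlt
    rw [pvFindK, if_neg h] at hlt
    omega

-- A returns [] when x < 2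
lemma pvA_small {x : Int} (hx : x < 2) : print_factors x = [] := by
  unfold print_factors
  rw [pvL2_eq]
  have : (pvL2 x).length ≤ 1 := by
    rcases Int.lt_or_le x 1 with h | h
    · have : pvL2 x = [] := by
        simp [pvL2, PySem.List.pyRange_one_eq_nil (by omega : x + 1 ≤ 1)]
      simp [this]
    · have hx1 : x = 1 := by omega
      subst hx1
      decide
  simp only [gt_iff_lt]
  rw [if_neg (by omega)]

-- A's second loop in closed form
lemma pvA_loop (x : Int) :
    (PySem.List.pyRange 0 ((pvL2 x).length : Int) 1).foldl
      (fun acc j =>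
        if (pvL2 x).contains (PySem.List.pyGetD (pvL2 x) j 0 + 1) then
          if (PySem.List.pyGetD (pvL2 x) j 0 + 1) * PySem.List.pyGetD (pvL2 x) j 0 == x then acc ++ [x]
          else acc
        else acc) []
    = ((pvL2 x).filter
        (fun v => (pvL2 x).contains (v + 1) && ((v + 1) * v == x))).map (fun _ => x) := by
  rw [PySem.List.foldl_pyRange_zero_pyGetD' (pvL2 x) 0
      (fun acc v =>
        if (pvL2 x).contains (v + 1) then
          if (v + 1) * v == x then acc ++ [x] else acc
        else acc) []]
  have hf : (fun (acc : List Int) (v : Int) =>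
      if (pvL2 x).contains (v + 1) then
        if (v + 1) * v == x then acc ++ [x] else acc
      else acc)
    = (fun acc v => if ((pvL2 x).contains (v + 1) && ((v + 1) * v == x)) then acc ++ [x] else acc) := by
    funext acc v
    by_cases h1 : (pvL2 x).contains (v + 1) <;> by_cases h2 : ((v + 1) * v == x) <;> simp [h2]
  rw [hf]
  simpa using PySem.List.foldl_append_if (l := pvL2 x)
    (p := fun v => (pvL2 x).contains (v + 1) && ((v + 1) * v == x)) (f := fun _ => x) (acc := [])

-- ===== VERDICT (by name: the statement is the Claim_ definition above) =====
theorem print_factors_spec : Claim_equal_print_factors := by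
  intro x _
  unfold Spec_print_factors
  rcases Int.lt_or_le x 2 with hx | hx
  · rw [pvA_small hx]
    unfold print_factors_alt
    rw [if_pos hx]
  · -- x ≥ 2
    have hA : print_factors x =
        ((pvL2 x).filter
          (fun v => (pvL2 x).contains (v + 1) && ((v + 1) * v == x))).map (fun _ => x)
        ∨ ((pvL2 x).length ≤ 1 ∧ print_factors x = []) := by
      unfold print_factors
      rw [pvL2_eq]
      by_cases hl : (pvL2 x).length > 1
      · left; rw [if_pos hl]; exact pvA_loop x
      · right; exact ⟨by omega, by rw [if_neg hl]⟩
    set k := pvFindK x 1 with hk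
    have hk1 : 1 ≤ k := pvFindK_ge x 1
    have hstop : x ≤ k * (k + 1) := pvFindK_stop x 1
    have hmin := pvFindK_min x 1
    by_cases hsol : k * (k + 1) = x
    · -- solution exists: both sides are [x]
      have hBalt : print_factors_alt x = [x] := by
        unfold print_factors_alt
        rw [if_neg (by omega)]
        simp [← hk, hsol]
      rw [hBalt]
      -- k and k+1 are divisors
      have hkmem : k ∈ pvL2 x := by
        rw [mem_pvL2]
        exact ⟨⟨hk1, by nlinarith⟩, ⟨k + 1, by linarith [hsol]⟩⟩
      have hk1mem : (k + 1) ∈ pvL2 x := by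
        rw [mem_pvL2]
        exact ⟨⟨by omega, by nlinarith⟩, ⟨k, by linarith [hsol]⟩⟩
      have hlen : (pvL2 x).length > 1 := by
        rcases hl2 : pvL2 x with _ | ⟨a, _ | ⟨b, t⟩⟩
        · rw [hl2] at hkmem; cases hkmem
        · rw [hl2] at hkmem hk1mem
          have := List.mem_singleton.mp hkmem
          have := List.mem_singleton.mp hk1mem
          omega
        · simp
      have hq : ((pvL2 x).contains (k + 1) && ((k + 1) * k == x)) = true := by
        simp [hk1mem]
        linarith [hsol]
      have huniq : ∀ v ∈ pvL2 x,
          ((pvL2 x).contains (v + 1) && ((v + 1) * v == x)) = true → v = k := by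
        intro v hv hqv
        simp at hqv
        have hv1 : 1 ≤ v := ((mem_pvL2 x v).mp hv).1.1
        exact pv_unique hv1 hk1 (by linarith [hqv.2, hsol])
      have hfilter := pv_filter_unique (pvL2_nodup x) hkmem hq huniq
      rcases hA with hA | ⟨hl, _⟩
      · rw [hA, hfilter]; rfl
      · omega
    · -- no solution: both sides are []
      have hBalt : print_factors_alt x = [] := by
        unfold print_factors_alt
        rw [if_neg (by omega)]
        simp [← hk, hsol]
      rw [hBalt]
      have hnone : ∀ m : Int, 1 ≤ m → m * (m + 1) ≠ x := by
        intro m hm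
        rcases lt_trichotomy m k with h | rfl | h
        · have := hmin m hm h; omega
        · exact hsol
        · have : k * (k + 1) ≤ m * (m + 1) := by nlinarith
          omega
      have hfilter : (pvL2 x).filter
          (fun v => (pvL2 x).contains (v + 1) && ((v + 1) * v == x)) = [] := by
        apply List.filter_eq_nil_iff.mpr
        intro v hv hqv
        simp at hqv
        have hv1 : 1 ≤ v := ((mem_pvL2 x v).mp hv).1.1
        exact hnone v hv1 (by linarith [hqv.2])
      rcases hA with hA | ⟨_, hA⟩
      · rw [hA, hfilter]; rfl
      · rw [hA]
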